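-- pv_equiv track=rewrite | github.com/Idealm99/CodingTest | 프로그래머스/2/17687. ［3차］ n진수 게임/［3차］ n진수 게임.py | solution
-- ===== SOURCE A (Python) =====
-- def solution(n, t, m, p):
--     def convert(num, base):
--         digits = "0123456789ABCDEF"
--         if num == 0:
--             return "0"
--         res = ''
--         while num > 0:
--             res = digits[num % base] + res
--             num //= base
--         return res
--
--     sequence = ''
--     i = 0
--     while len(sequence) < t * m:
--         sequence += convert(i, n)
--         i += 1
--
--     result = ''
--     for i in range(t):
--         result += sequence[i * m + (p - 1)]
--
--     return result
-- ===== SOURCE B (Python) =====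
-- def solution(n, t, m, p):
--     # Streaming re-implementation: never materializes the concatenated sequence.
--     # Walk the digits of 0, 1, 2, ... keeping only an absolute position counter;
--     # collect a digit whenever its position is = p-1 (mod m); stop at t digits.
--     digits = "0123456789ABCDEF"
--     result = []
--     pos = 0
--     i = 0
--     while len(result) < t:
--         if i == 0:
--             ds = ["0"]
--         else:
--             ds = []
--             x = i
--             while x > 0:
--                 ds.append(digits[x % n])
--                 x //= n
--             ds.reverse()
--         for ch in ds:
--             if len(result) < t and pos % m == p - 1:
--                 result.append(ch)
--             pos += 1
--         i += 1
--     return ''.join(result)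
-- ===== Notes on version B (the rewrite author's own statement) =====
-- stated objective: alternative
-- what changed: B streams the digits of 0,1,2,... with a single absolute position counter, collecting a digit whenever its position is congruent to p-1 mod m and stopping as soon as t digits are collected, instead of materializing the whole concatenated sequence of length >= t*m and then indexing it t times.
-- outside the precondition, e.g. on solution(2, 3, 2, 0): A returns '110', B does not finish within the time limit; on solution(10, 3, 2, 0): A returns '513', B does not finish within the time limit; on solution(20, 2, 1, 1): A returns '01', B returns '01'
import Mathlib
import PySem

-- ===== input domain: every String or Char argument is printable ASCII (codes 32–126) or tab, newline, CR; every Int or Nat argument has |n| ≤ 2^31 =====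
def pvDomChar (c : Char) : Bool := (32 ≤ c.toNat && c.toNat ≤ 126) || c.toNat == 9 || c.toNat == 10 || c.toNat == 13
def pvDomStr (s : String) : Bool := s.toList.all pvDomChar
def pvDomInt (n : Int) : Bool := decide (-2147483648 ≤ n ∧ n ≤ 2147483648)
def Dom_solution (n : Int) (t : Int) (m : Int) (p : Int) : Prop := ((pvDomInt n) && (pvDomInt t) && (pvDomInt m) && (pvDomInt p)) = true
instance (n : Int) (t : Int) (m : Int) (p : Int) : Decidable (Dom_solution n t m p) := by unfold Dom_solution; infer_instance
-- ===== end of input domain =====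

-- B streams the digits of 0,1,2,… with one absolute position counter, collecting a digit whenever
-- its position ≡ p-1 (mod m) and stopping at t collected digits, instead of materializing the whole
-- concatenated sequence and indexing it afterwards (objective: alternative; same time, O(t) memory).

-- ===== PORT A =====
def pvDigits : List Char :=
  ['0','1','2','3','4','5','6','7','8','9','A','B','C','D','E','F']

-- A's inner `while num > 0` loop (fuel-guarded; fuel num.toNat+1 suffices since num strictly decreases)
def convertLoopA : Nat → Int → Int → List Char → List Char
  | 0, _, _, res => res
  | f+1, num, base, res =>
    if 0 < num then
      convertLoopA f (PySem.Int.floordiv num base) base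
        (((PySem.List.pyGet? pvDigits (PySem.Int.mod num base)).getD '?') :: res)
    else res

def convertA (num base : Int) : List Char :=
  if num = 0 then ['0'] else convertLoopA (num.toNat + 1) num base []

-- A's `while len(sequence) < t*m` loop (fuel-guarded; each iteration adds ≥ 1 char)
def seqLoopA : Nat → Int → Int → Int → List Char → List Char
  | 0, _, _, _, s => s
  | f+1, tm, n, i, s =>
    if (s.length : Int) < tm then seqLoopA f tm n (i + 1) (s ++ convertA i n) else s

def solution (n : Int) (t : Int) (m : Int) (p : Int) : String :=
  let s := seqLoopA ((t * m).toNat + 1) (t * m) n 0 []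
  let res := (PySem.List.pyRange 0 t 1).foldl
    (fun acc i => acc ++ [(PySem.List.pyGet? s (i * m + (p - 1))).getD '?']) []
  String.mk res

-- ===== PORT B =====
def pvDigitsB : List Char :=
  ['0','1','2','3','4','5','6','7','8','9','A','B','C','D','E','F']

-- Source B's inner `while x > 0` loop: append least-significant digit first, reverse afterwards
def convLoopB : Nat → Int → Int → List Char → List Char
  | 0, _, _, ds => ds
  | f+1, x, base, ds =>
    if 0 < x then
      convLoopB f (PySem.Int.floordiv x base) base
        (ds ++ [(PySem.List.pyGet? pvDigitsB (PySem.Int.mod x base)).getD '?'])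
    else ds

def convertB (i n : Int) : List Char :=
  if i = 0 then ['0'] else (convLoopB (i.toNat + 1) i n []).reverse

-- Source B's `for ch in ds` loop: one position counter, collect when pos % m == p-1 and result short
def innerB (t m p : Int) : List Char → Int → List Char → Int × List Char
  | [], pos, res => (pos, res)
  | c :: cs, pos, res =>
    innerB t m p cs (pos + 1)
      (if (res.length : Int) < t ∧ PySem.Int.mod pos m = p - 1 then res ++ [c] else res)

-- Source B's outer `while len(result) < t` loop (fuel-guarded; fuel (t*m).toNat+1 suffices)
def outerB (n t m p : Int) : Nat → Int → Int → List Char → List Char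
  | 0, _, _, res => res
  | f+1, i, pos, res =>
    if (res.length : Int) < t then
      let st := innerB t m p (convertB i n) pos res
      outerB n t m p f (i + 1) st.1 st.2
    else res

def solution_alt (n : Int) (t : Int) (m : Int) (p : Int) : String :=
  String.mk (outerB n t m p ((t * m).toNat + 1) 0 0 [])

-- ===== PRECONDITION & SPEC =====
-- Pre_ restricts to the problem's natural domain (2 ≤ n ≤ 16, m ≥ 1, 1 ≤ p ≤ m), plus the t ≤ 0
-- inputs on which A trivially returns "": outside it A diverges (n ≤ 1), raises IndexError (n > 16
-- once a digit ≥ 16 is needed, or p > m past the sequence end), or uses accidental negative-index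
-- wraparound (p ≤ 0), on which B's streaming loop would never terminate.
def Pre_solution (n : Int) (t : Int) (m : Int) (p : Int) : Prop :=
  (2 ≤ n ∧ n ≤ 16 ∧ 1 ≤ m ∧ 1 ≤ p ∧ p ≤ m) ∨ (t ≤ 0 ∧ 0 ≤ m)
instance (n : Int) (t : Int) (m : Int) (p : Int) : Decidable (Pre_solution n t m p) := by
  unfold Pre_solution; infer_instance
def pvWitness_solution : Int × Int × Int × Int := (2, 4, 2, 1)

def Spec_solution (n : Int) (t : Int) (m : Int) (p : Int) (out : String) : Prop := out = solution_alt n t m p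
instance (n : Int) (t : Int) (m : Int) (p : Int) (out : String) : Decidable (Spec_solution n t m p out) := by unfold Spec_solution; infer_instance

-- ===== CLAIM (what is proved, stated in full; the proofs are below) =====
def Claim_equal_solution : Prop := ∀ (n : Int) (t : Int) (m : Int) (p : Int), Dom_solution n t m p → Pre_solution n t m p → Spec_solution n t m p (solution n t m p)

-- ===== LEMMAS AND PROOFS =====

-- the digit list of one number, the concatenated stream, and its j-th character
def pvConv (n : Int) (i : Nat) : List Char := convertA (i : Int) n
def pvCat (n : Int) (k : Nat) : List Char := (List.range k).flatMap (pvConv n)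
def pvStrm (n : Int) (j : Nat) : Char := (pvCat n (j + 1)).getD j '?'
def pvSel (n : Int) (mN r q : Nat) : List Char :=
  ((List.range q).filter (fun j => j % mN == r)).map (pvStrm n)
def pvTarget (n : Int) (mN r tN : Nat) : List Char :=
  (List.range tN).map (fun k => pvStrm n (k * mN + r))

lemma convertLoopA_acc (f : Nat) : ∀ (x b : Int) (res : List Char),
    convertLoopA f x b res = convertLoopA f x b [] ++ res := by
  induction f with
  | zero => intro x b res; simp [convertLoopA]
  | succ f ih =>
    intro x b res
    by_cases h : 0 < x
    · simp only [convertLoopA, if_pos h]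
      rw [ih _ _ (_ :: res), ih _ _ [_]]; simp
    · simp [convertLoopA, h]

lemma convLoopB_acc (f : Nat) : ∀ (x b : Int) (ds : List Char),
    convLoopB f x b ds = ds ++ convLoopB f x b [] := by
  induction f with
  | zero => intro x b ds; simp [convLoopB]
  | succ f ih =>
    intro x b ds
    by_cases h : 0 < x
    · simp only [convLoopB, if_pos h]
      rw [ih _ _ (ds ++ [_]), ih _ _ ([] ++ [_])]; simp
    · simp [convLoopB, h]

lemma pvDigitsB_eq : pvDigitsB = pvDigits := rfl

lemma convLoopB_rev (f : Nat) : ∀ (x b : Int),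
    (convLoopB f x b []).reverse = convertLoopA f x b [] := by
  induction f with
  | zero => intro x b; simp [convLoopB, convertLoopA]
  | succ f ih =>
    intro x b
    by_cases h : 0 < x
    · simp only [convLoopB, convertLoopA, if_pos h]
      rw [convLoopB_acc, convertLoopA_acc]
      simp [ih, pvDigitsB_eq]
    · simp [convLoopB, convertLoopA, h]

lemma convertB_eq (i n : Int) : convertB i n = convertA i n := by
  unfold convertB convertA
  by_cases h : i = 0
  · simp [h]
  · simp only [if_neg h]
    by_cases h' : 0 < i
    · simp only [convertLoopA, convLoopB, if_pos h']
      rw [convLoopB_acc, convertLoopA_acc]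
      simp [convLoopB_rev, pvDigitsB_eq]
    · simp [convertLoopA, convLoopB, h']

lemma pvConv_ne_nil (n : Int) (i : Nat) : pvConv n i ≠ [] := by
  unfold pvConv convertA
  by_cases h : (i : Int) = 0
  · simp [h]
  · have h' : 0 < (i : Int) := by omega
    simp only [if_neg h]
    have : (i : Int).toNat + 1 = i.succ := by omega
    rw [this]
    simp only [convertLoopA, if_pos h']
    rw [convertLoopA_acc]
    simp

lemma pvCat_succ (n : Int) (k : Nat) : pvCat n (k + 1) = pvCat n k ++ pvConv n k := by
  simp [pvCat, List.range_succ]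

lemma pvCat_len (n : Int) (k : Nat) : k ≤ (pvCat n k).length := by
  induction k with
  | zero => simp [pvCat]
  | succ k ih =>
    rw [pvCat_succ]
    have := List.length_pos_of_ne_nil (pvConv_ne_nil n k)
    simp only [List.length_append]
    omega

lemma pvCat_prefix (n : Int) {k k' : Nat} (h : k ≤ k') : pvCat n k <+: pvCat n k' := by
  induction k', h using Nat.le_induction with
  | base => exact List.prefix_refl _
  | succ k' _ ih =>
    refine ih.trans ?_
    rw [pvCat_succ]
    exact List.prefix_append _ _

lemma getD_of_prefix {l₁ l₂ : List Char} (h : l₁ <+: l₂) {j : Nat} (hj : j < l₁.length) :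
    l₂.getD j '?' = l₁.getD j '?' := by
  obtain ⟨s, rfl⟩ := h
  rw [List.getD_eq_getElem _ _ hj, List.getD_eq_getElem _ _ (by simp; omega),
    List.getElem_append_left hj]

lemma strm_eq (n : Int) {k j : Nat} (hj : j < (pvCat n k).length) :
    (pvCat n k).getD j '?' = pvStrm n j := by
  unfold pvStrm
  have h1 : pvCat n k <+: pvCat n (max k (j + 1)) := pvCat_prefix n (le_max_left _ _)
  have h2 : pvCat n (j + 1) <+: pvCat n (max k (j + 1)) := pvCat_prefix n (le_max_right _ _)
  have hj2 : j < (pvCat n (j + 1)).length := lt_of_lt_of_le (Nat.lt_succ_self j) (pvCat_len n (j + 1))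
  rw [← getD_of_prefix h1 hj, ← getD_of_prefix h2 hj2]

-- A's building loop ends in some full prefix pvCat n K of length ≥ t*m
lemma seqA_out (n tm : Int) : ∀ (f : Nat) (iN : Nat),
    (pvCat n iN).length + f ≥ tm.toNat + 1 →
    ∃ K : Nat, seqLoopA f tm n (iN : Int) (pvCat n iN) = pvCat n K ∧
      ¬ ((pvCat n K).length : Int) < tm := by
  intro f
  induction f with
  | zero =>
    intro iN h
    exact ⟨iN, rfl, by omega⟩
  | succ f ih =>
    intro iN h
    by_cases hc : ((pvCat n iN).length : Int) < tm
    · simp only [seqLoopA, if_pos hc]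
      have hstep : pvCat n iN ++ convertA (iN : Int) n = pvCat n (iN + 1) := (pvCat_succ n iN).symm
      have hlen : (pvCat n iN).length + 1 ≤ (pvCat n (iN + 1)).length := by
        rw [pvCat_succ]
        have := List.length_pos_of_ne_nil (pvConv_ne_nil n iN)
        simp only [List.length_append]; omega
      have hcast : (iN : Int) + 1 = ((iN + 1 : Nat) : Int) := by push_cast; ring
      rw [hstep, hcast]
      exact ih (iN + 1) (by omega)
    · exact ⟨iN, by simp [seqLoopA, hc], hc⟩

lemma sel_succ (n : Int) (mN r q : Nat) :
    pvSel n mN r (q + 1) =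
      pvSel n mN r q ++ (if q % mN = r then [pvStrm n q] else []) := by
  unfold pvSel
  rw [List.range_succ, List.filter_append, List.map_append]
  by_cases h : q % mN = r <;> simp [h]

lemma sel_prefix (n : Int) (mN r : Nat) {q q' : Nat} (h : q ≤ q') :
    pvSel n mN r q <+: pvSel n mN r q' := by
  induction q', h using Nat.le_induction with
  | base => exact List.prefix_refl _
  | succ q' _ ih =>
    refine ih.trans ?_
    rw [sel_succ]
    exact List.prefix_append _ _

lemma range_filter_single (mN r : Nat) (h : r < mN) :
    (List.range mN).filter (fun x => x == r) = [r] := by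
  induction mN with
  | zero => omega
  | succ mN ih =>
    rw [List.range_succ, List.filter_append]
    by_cases h' : r < mN
    · rw [ih h']
      have : (mN == r) = false := by simp; omega
      simp [this]
    · have hr : r = mN := by omega
      rw [hr]
      have hnil : (List.range mN).filter (fun x => x == mN) = [] := by
        simp only [List.filter_eq_nil_iff, List.mem_range, beq_iff_eq]
        omega
      rw [hnil]
      simp

lemma sel_mul (n : Int) (mN r : Nat) (hr : r < mN) (a : Nat) :
    pvSel n mN r (a * mN) = (List.range a).map (fun k => pvStrm n (k * mN + r)) := by
  induction a with
  | zero => simp [pvSel]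
  | succ a ih =>
    have hsplit : (a + 1) * mN = a * mN + mN := by ring
    unfold pvSel
    rw [hsplit, List.range_add, List.filter_append, List.map_append]
    unfold pvSel at ih
    rw [ih, List.range_succ, List.map_append]
    congr 1
    have hfc : (List.range mN).filter (fun x => (a * mN + x) % mN == r) =
        (List.range mN).filter (fun x => x == r) := by
      apply List.filter_congr
      intro x hx
      simp only [List.mem_range] at hx
      simp [Nat.mod_eq_of_lt hx]
    rw [List.filter_map,
      show ((fun j => j % mN == r) ∘ (a * mN + ·)) = (fun x => (a * mN + x) % mN == r) from rfl,
      hfc, range_filter_single mN r hr]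
    simp

lemma take_of_prefix {l₁ l₂ : List Char} (h : l₁ <+: l₂) {tN : Nat} (hl : tN ≤ l₁.length) :
    l₁.take tN = l₂.take tN := by
  obtain ⟨s, rfl⟩ := h
  rw [List.take_append_of_le_length hl]

lemma take_sel_eq_target (n : Int) (mN r tN : Nat) (hr : r < mN) {q : Nat}
    (h : tN ≤ (pvSel n mN r q).length) :
    (pvSel n mN r q).take tN = pvTarget n mN r tN := by
  have hlenmul : (pvSel n mN r (tN * mN)).length = tN := by
    rw [sel_mul n mN r hr]; simp
  have h1 : (pvSel n mN r q).take tN = (pvSel n mN r (max q (tN * mN))).take tN :=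
    take_of_prefix (sel_prefix n mN r (le_max_left _ _)) h
  have h2 : (pvSel n mN r (tN * mN)).take tN = (pvSel n mN r (max q (tN * mN))).take tN :=
    take_of_prefix (sel_prefix n mN r (le_max_right _ _)) (by omega)
  rw [h1, ← h2, sel_mul n mN r hr, List.take_of_length_le (by simp)]
  rfl

-- length of pvSel grows beyond tN once q ≥ tN * mN
lemma sel_len_ge (n : Int) (mN r tN : Nat) (hr : r < mN) {q : Nat} (hq : tN * mN ≤ q) :
    tN ≤ (pvSel n mN r q).length := by
  have hpre := sel_prefix n mN r hq
  have h1 : (pvSel n mN r (tN * mN)).length = tN := by rw [sel_mul n mN r hr]; simp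
  have := hpre.length_le
  omega

-- the characters of pvConv n iN sit in the stream at positions (pvCat n iN).length + off
lemma conv_chars (n : Int) (iN : Nat) : ∀ off, off < (pvConv n iN).length →
    (pvConv n iN).getD off '?' = pvStrm n ((pvCat n iN).length + off) := by
  intro off hoff
  have hcat : pvCat n (iN + 1) = pvCat n iN ++ pvConv n iN := pvCat_succ n iN
  have hlt : (pvCat n iN).length + off < (pvCat n (iN + 1)).length := by
    rw [hcat]; simp only [List.length_append]; omega
  have hlt' : (pvCat n iN).length + off < (pvCat n iN ++ pvConv n iN).length := by
    simp only [List.length_append]; omega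
  rw [← strm_eq n hlt, hcat, List.getD_eq_getElem _ _ hlt', List.getD_eq_getElem _ _ hoff,
    List.getElem_append_right (by omega)]
  congr 1
  omega

-- the inner for-loop advances pos by |cs| and keeps res = take tN of the selected stream chars
lemma innerB_spec (n t m p : Int) (mN r tN : Nat) (hm : m = (mN : Int)) (hp : p - 1 = (r : Int))
    (ht : t = (tN : Int)) :
    ∀ (cs : List Char) (q : Nat) (res : List Char),
      (∀ off, off < cs.length → cs.getD off '?' = pvStrm n (q + off)) →
      res = (pvSel n mN r q).take tN →
      innerB t m p cs (q : Int) res =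
        (((q + cs.length : Nat) : Int), (pvSel n mN r (q + cs.length)).take tN) := by
  intro cs
  induction cs with
  | nil => intro q res _ hres; simp [innerB, hres]
  | cons c cs ih =>
    intro q res hchars hres
    have hc : c = pvStrm n q := by
      have := hchars 0 (by simp)
      simpa using this
    have hmod : PySem.Int.mod (q : Int) m = ((q % mN : Nat) : Int) := by
      rw [hm]; exact_mod_cast PySem.Int.mod_natCast q mN
    have hsellen : res.length = min tN (pvSel n mN r q).length := by simp [hres]
    have step : (if (res.length : Int) < t ∧ PySem.Int.mod (q : Int) m = p - 1
          then res ++ [c] else res) = (pvSel n mN r (q + 1)).take tN := by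
      rw [sel_succ]
      by_cases hq : q % mN = r
      · by_cases hlen : res.length < tN
        · have hself : (pvSel n mN r q).length < tN := by omega
          have htake : (pvSel n mN r q).take tN = pvSel n mN r q :=
            List.take_of_length_le (by omega)
          rw [if_pos ⟨by rw [ht]; exact_mod_cast hlen, by rw [hmod, hq]; exact hp.symm⟩]
          rw [hres, htake, if_pos hq, hc]
          rw [List.take_of_length_le (by simp; omega)]
        · have hge : tN ≤ (pvSel n mN r q).length := by omega
          rw [if_neg (fun hcon => hlen (by rw [ht] at hcon; exact_mod_cast hcon.1))]
          rw [if_pos hq, List.take_append_of_le_length hge, hres]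
      · rw [if_neg hq, List.append_nil,
          if_neg (fun hcon => hq (by
            have h2 := hcon.2
            rw [hmod, hp] at h2
            exact_mod_cast h2)), hres]
    have hchars' : ∀ off, off < cs.length → cs.getD off '?' = pvStrm n ((q + 1) + off) := by
      intro off hoff
      have := hchars (off + 1) (by simp; omega)
      simpa [Nat.add_assoc, Nat.add_comm 1 off] using this
    have hq1 : (q : Int) + 1 = ((q + 1 : Nat) : Int) := by push_cast; ring
    have harr : q + (c :: cs).length = (q + 1) + cs.length := by simp; omega
    rw [harr]
    simp only [innerB]
    rw [step, hq1]
    exact ih (q + 1) _ hchars' rfl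

-- the outer while-loop returns the target once given enough fuel
lemma outerB_out (n t m p : Int) (mN r tN : Nat) (hm : m = (mN : Int)) (hp : p - 1 = (r : Int))
    (ht : t = (tN : Int)) (hr : r < mN) :
    ∀ (f : Nat) (iN : Nat) (res : List Char),
      res = (pvSel n mN r ((pvCat n iN).length)).take tN →
      f + (pvCat n iN).length ≥ tN * mN + 1 →
      outerB n t m p f (iN : Int) (((pvCat n iN).length : Nat) : Int) res =
        pvTarget n mN r tN := by
  intro f
  induction f with
  | zero =>
    intro iN res hres hfuel
    have hlen : tN ≤ (pvSel n mN r ((pvCat n iN).length)).length :=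
      sel_len_ge n mN r tN hr (by omega)
    rw [hres, take_sel_eq_target n mN r tN hr hlen]
    rfl
  | succ f ih =>
    intro iN res hres hfuel
    by_cases hc : res.length < tN
    · simp only [outerB, if_pos (show ((res.length : Int) < t) by rw [ht]; exact_mod_cast hc)]
      rw [convertB_eq]
      have hinner := innerB_spec n t m p mN r tN hm hp ht (convertA (iN : Int) n)
        ((pvCat n iN).length) res (conv_chars n iN) hres
      have hconv : (pvCat n iN).length + (convertA (iN : Int) n).length
          = (pvCat n (iN + 1)).length := by
        rw [pvCat_succ]; simp [pvConv]
      rw [hinner]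
      simp only
      have hcast : (iN : Int) + 1 = ((iN + 1 : Nat) : Int) := by push_cast; ring
      rw [hcast, hconv]
      apply ih (iN + 1) _ rfl
      have hgrow : (pvCat n iN).length + 1 ≤ (pvCat n (iN + 1)).length := by
        rw [pvCat_succ]
        have := List.length_pos_of_ne_nil (pvConv_ne_nil n iN)
        simp only [List.length_append]; omega
      omega
    · simp only [outerB, if_neg (show ¬((res.length : Int) < t) by rw [ht]; push_cast; omega)]
      have hminlen : res.length = min tN (pvSel n mN r ((pvCat n iN).length)).length := by
        simp [hres]
      have hlen : tN ≤ (pvSel n mN r ((pvCat n iN).length)).length := by omega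
      rw [hres, take_sel_eq_target n mN r tN hr hlen]

-- A's result, in the main case, is the target string
lemma solutionA_target (n t m p : Int) (mN r tN : Nat) (hm : m = (mN : Int)) (hp : p - 1 = (r : Int))
    (ht : t = (tN : Int)) (hr : r < mN) :
    solution n t m p = String.mk (pvTarget n mN r tN) := by
  simp only [solution]
  obtain ⟨K, hK, hKlen⟩ := seqA_out n (t * m) ((t * m).toNat + 1) 0 (by simp [pvCat])
  rw [show seqLoopA ((t * m).toNat + 1) (t * m) n 0 [] = pvCat n K from hK]
  have htm : t * m = ((tN * mN : Nat) : Int) := by rw [ht, hm]; push_cast; ring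
  have hlen : tN * mN ≤ (pvCat n K).length := by
    rw [htm] at hKlen; push_cast at hKlen; omega
  congr 1
  rw [PySem.List.pyRange_one]
  simp only [sub_zero, ht, Int.toNat_natCast]
  rw [List.foldl_map, PySem.List.foldl_append_singleton_eq_map]
  apply List.map_congr_left
  intro k hk
  simp only [List.mem_range] at hk
  have hidx : k * mN + r < (pvCat n K).length := by
    have : k * mN + r < tN * mN := by
      have h1 : k + 1 ≤ tN := hk
      calc k * mN + r < k * mN + mN := by omega
        _ = (k + 1) * mN := by ring
        _ ≤ tN * mN := Nat.mul_le_mul_right mN h1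
    omega
  have hcast : (0 + ((k : Nat) : Int)) * m + (p - 1) = ((k * mN + r : Nat) : Int) := by
    rw [hm, hp]; push_cast; ring
  rw [hcast, PySem.List.pyGet?_natCast, ← List.getD_eq_getElem?_getD, strm_eq n hidx]

-- both sides return "" when t ≤ 0 and m ≥ 0
lemma trivial_case (n t m p : Int) (ht : t ≤ 0) (_hm : 0 ≤ m) :
    solution n t m p = "" ∧ solution_alt n t m p = "" := by
  constructor
  · simp only [solution]
    rw [PySem.List.pyRange_one_eq_nil (by omega)]
    rfl
  · simp only [solution_alt, outerB]
    rw [if_neg (by push_cast; omega)]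
    rfl

-- ===== VERDICT (by name: the statement is the Claim_ definition above) =====
theorem solution_spec : Claim_equal_solution := by
  intro n t m p _hdom hpre
  unfold Spec_solution
  rcases hpre with ⟨_hn2, _hn16, hm1, hp1, hpm⟩ | ⟨ht, hm⟩
  · by_cases ht0 : t ≤ 0
    · have h := trivial_case n t m p ht0 (by omega)
      rw [h.1, h.2]
    · replace ht0 : 0 < t := by omega
      have hm' : m = ((m.toNat : Nat) : Int) := (Int.toNat_of_nonneg (by omega)).symm
      have hp' : p - 1 = (((p - 1).toNat : Nat) : Int) := (Int.toNat_of_nonneg (by omega)).symm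
      have ht' : t = ((t.toNat : Nat) : Int) := (Int.toNat_of_nonneg (by omega)).symm
      have hr : (p - 1).toNat < m.toNat := by omega
      rw [solutionA_target n t m p m.toNat (p - 1).toNat t.toNat hm' hp' ht' hr]
      have htm : t * m = ((t.toNat * m.toNat : Nat) : Int) := by
        push_cast
        rw [← ht', ← hm']
      have hfuel : ((t * m).toNat + 1) + (pvCat n 0).length ≥ t.toNat * m.toNat + 1 := by
        rw [htm, Int.toNat_natCast]; simp [pvCat]
      have hB := outerB_out n t m p m.toNat (p - 1).toNat t.toNat hm' hp' ht' hr
        ((t * m).toNat + 1) 0 [] (by simp [pvSel, pvCat]) hfuel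
      simp only [solution_alt]
      rw [show outerB n t m p ((t * m).toNat + 1) 0 0 [] = pvTarget n m.toNat (p - 1).toNat t.toNat
        from by simpa [pvCat] using hB]
  · have h := trivial_case n t m p ht hm
    rw [h.1, h.2]
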